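-- pv_equiv track=rewrite | github.com/Mr-PAW/ProjectGilaKonpacer | cipherGIla.py | super_encrypt_text
-- ===== SOURCE A (Python) =====
-- import binascii
--
-- def caesar_encrypt_text(plaintext: str, key: int) -> str:
--     res = []
--     for ch in plaintext:
--         if ch.isalpha():
--             base = 'A' if ch.isupper() else 'a'
--             res.append(chr((ord(ch) - ord(base) + key) % 26 + ord(base)))
--         else:
--             res.append(ch)
--     return ''.join(res)
--
-- def vigenere_encrypt_text(plaintext: str, key: str) -> str:
--     res = []
--     keyletters = ''.join([c for c in key if c.isalpha()])
--     if not keyletters: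
--         return plaintext
--     ki = 0
--     for ch in plaintext:
--         if ch.isalpha():
--             base = 'A' if ch.isupper() else 'a'
--             k = ord(keyletters[ki % len(keyletters)].lower()) - ord('a')
--             res.append(chr((ord(ch) - ord(base) + k) % 26 + ord(base)))
--             ki += 1
--         else:
--             res.append(ch)
--     return ''.join(res)
--
-- def xor_encrypt_text(plaintext: str, key: str) -> str:
--     ptbytes = plaintext.encode('utf-8')
--     keybytes = key.encode('utf-8') if key else b'\x00'
--     out = bytes([ptbytes[i] ^ keybytes[i % len(keybytes)] for i in range(len(ptbytes))])
--     return binascii.hexlify(out).decode()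
--
-- def super_encrypt_text(plaintext: str, key: str) -> str:
--     # Support composite key format for super encryption so each stage can use a
--     # different key. Expected composite format: 'vig=<vigenere_key>;caesar=<shift>;xor=<xor_key>'
--     # If provided key doesn't match composite format, fall back to legacy behavior
--     # where the same `key` is used for all stages.
--     def _parse_super_key(k: str):
--         if not k:
--             return ('', None, '')
--         # try simple parser splitting by ';' and '='
--         parts = [p.strip() for p in k.split(';') if '=' in p]
--         if not parts:
--             return (k, None, k)
--         vig = ''
--         caesar = None
--         xr = ''
--         for p in parts:
--             try:
--                 name, val = p.split('=', 1)
--             except ValueError: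
--                 continue
--             name = name.strip().lower()
--             val = val.strip()
--             if name in ('vig', 'vigenere'):
--                 vig = val
--             elif name == 'caesar':
--                 try:
--                     caesar = int(val)
--                 except Exception:
--                     caesar = None
--             elif name in ('xor', 'xorkey'):
--                 xr = val
--         # If caesar not specified but vig provided, leave caesar as None to derive later
--         return (vig or '', caesar, xr or '')
--
--     vig_key, caesar_key, xor_key = _parse_super_key(key)
--
--     # Stage 1: Vigenere (use provided vig_key or legacy use of `key`)
--     if vig_key:
--         stage1 = vigenere_encrypt_text(plaintext, vig_key)
--     else:
--         stage1 = vigenere_encrypt_text(plaintext, key)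
--
--     # Stage 2: Caesar (use provided numeric caesar_key; if not provided, derive from vig_key or legacy key)
--     if caesar_key is None:
--         base_for_shift = vig_key if vig_key else key
--         if base_for_shift:
--             try:
--                 shift = sum(bytearray(base_for_shift.encode('utf-8'))) % 26
--             except Exception:
--                 shift = 0
--         else:
--             shift = 0
--     else:
--         shift = caesar_key % 26
--     stage2 = caesar_encrypt_text(stage1, shift)
--
--     # Stage 3: XOR (use xor_key if present, else legacy key)
--     use_xor_key = xor_key if xor_key else key
--     stage3 = xor_encrypt_text(stage2, use_xor_key)
--     return stage3
-- ===== SOURCE B (Python) =====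
-- def super_encrypt_text(plaintext: str, key: str) -> str:
--     # Extract composite-key fields by independent backward scans (last assignment
--     # wins), instead of A's stateful forward fold over a (vig, caesar, xor) triple.
--     parts = [p.strip() for p in key.split(';') if '=' in p] if key else []
--
--     def last_field(names):
--         for p in reversed(parts):
--             name, val = p.split('=', 1)
--             if name.strip().lower() in names:
--                 return val.strip()
--         return None
--
--     if not key:
--         vig, caesar, xr = '', None, ''
--     elif not parts:
--         vig, caesar, xr = key, None, key
--     else:
--         vig = last_field(('vig', 'vigenere')) or ''
--         cv = last_field(('caesar',))
--         caesar = None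
--         if cv is not None:
--             try:
--                 caesar = int(cv)
--             except Exception:
--                 caesar = None
--         xr = last_field(('xor', 'xorkey')) or ''
--
--     # Effective parameters of the three stages.
--     vk = key if not vig else vig
--     if caesar is not None:
--         shift = caesar % 26
--     elif vk:
--         shift = sum(vk.encode('utf-8')) % 26
--     else:
--         shift = 0
--     kl = [c.lower() for c in vk if c.isalpha()]
--     xk = (key if not xr else xr).encode('utf-8') or b'\x00'
--     m = len(xk)
--
--     # ONE pass over the plaintext: Vigenere + Caesar + XOR + hex, two output
--     # characters per input character (exact for ASCII text, one byte per char).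
--     out = []
--     ki = 0
--     for i, ch in enumerate(plaintext):
--         if ch.isalpha():
--             base = 65 if ch.isupper() else 97
--             v = ord(kl[ki % len(kl)]) - 97 if kl else 0
--             b = (ord(ch) - base + v + shift) % 26 + base
--             ki += 1
--         else:
--             b = ord(ch)
--         out.append('%02x' % (b ^ xk[i % m]))
--     return ''.join(out)
-- ===== Notes on version B (the rewrite author's own statement) =====
-- stated objective: alternative
-- what changed: B collapses A's three staged passes (Vigenere over the text, Caesar over the intermediate text, then XOR+hexlify over the bytes) into a single loop over the plaintext that emits the two final hex characters per input character, and extracts the composite-key fields by independent backward scans (last assignment wins) instead of A's stateful forward fold over a (vig, caesar, xor) triple.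
import Mathlib
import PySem

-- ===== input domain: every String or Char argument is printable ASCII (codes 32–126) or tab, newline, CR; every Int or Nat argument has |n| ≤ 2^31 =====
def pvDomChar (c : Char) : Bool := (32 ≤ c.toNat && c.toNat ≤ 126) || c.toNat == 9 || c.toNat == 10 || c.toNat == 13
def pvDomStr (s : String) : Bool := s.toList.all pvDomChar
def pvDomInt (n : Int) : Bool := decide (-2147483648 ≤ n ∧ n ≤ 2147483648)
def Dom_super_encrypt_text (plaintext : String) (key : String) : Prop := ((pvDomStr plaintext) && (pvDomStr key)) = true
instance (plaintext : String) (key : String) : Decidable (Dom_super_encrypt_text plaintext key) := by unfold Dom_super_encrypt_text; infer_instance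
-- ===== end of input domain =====

-- B replaces A's staged pipeline (a Vigenere pass, then a Caesar pass over the intermediate text,
-- then an XOR+hexlify pass) by ONE pass over the plaintext emitting two hex characters per input
-- character, and extracts the composite-key fields by independent backward scans (last assignment
-- wins) instead of A's stateful forward fold. Exact on the printable-ASCII domain (one byte per char).

-- shared literal tuples from the Python source ('vig','vigenere') / ('caesar',) / ('xor','xorkey')
def TVIG : List (List Char) := [['v','i','g'], ['v','i','g','e','n','e','r','e']]
def TCAE : List (List Char) := [['c','a','e','s','a','r']]
def TXOR : List (List Char) := [['x','o','r'], ['x','o','r','k','e','y']]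

-- shared: 'name, val = p.split("=", 1)'; none = the try/except ValueError path (never fires on
-- parts filtered to contain '=')
def nameval? (p : List Char) : Option (List Char × List Char) :=
  match PySem.Chars.splitOnMax p ['='] 1 with
  | [name, val] => some (name, val)
  | _ => none

def hexDigit (n : Nat) : Char := Char.ofNat (if n < 10 then 48 + n else 87 + n)

-- ===== PORT A =====
-- the body of A's 'for p in parts' loop, updating the (vig, caesar, xr) state
def stepFn (st : List Char × Option Int × List Char) (p : List Char) :
    List Char × Option Int × List Char :=
  match nameval? p with
  | some (name0, val0) =>
    let name := PySem.Chars.lower (PySem.Chars.strip name0)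
    let val := PySem.Chars.strip val0
    if name ∈ TVIG then (val, st.2.1, st.2.2)
    else if name ∈ TCAE then (st.1, PySem.Int.ofChars? val, st.2.2)   -- int(val); except → None is ofChars? = none
    else if name ∈ TXOR then (st.1, st.2.1, val)
    else st
  | none => st

-- A's _parse_super_key; 'vig or ""' on a string returns vig itself, so the tuple is returned directly
def parseSuperKey (k : List Char) : List Char × Option Int × List Char :=
  if k = [] then ([], none, [])
  else
    let parts := ((PySem.Chars.splitOn k [';']).filter (fun p => p.contains '=')).map PySem.Chars.strip
    if parts = [] then (k, none, k)
    else parts.foldl stepFn ([], none, [])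

def caesarLoop (key : Int) : List Char → List Char
  | [] => []
  | c :: rest =>
    (if PySem.Chars.isalpha c then
      let base : Int := if PySem.Chars.isupper c then 65 else 97
      Char.ofNat ((PySem.Int.mod ((c.toNat : Int) - base + key) 26 + base).toNat)
    else c) :: caesarLoop key rest

def vigLoop (kl : List Char) (ki : Nat) : List Char → List Char
  | [] => []
  | c :: rest =>
    if PySem.Chars.isalpha c then
      let base : Int := if PySem.Chars.isupper c then 65 else 97
      let k : Int := ((PySem.Chars.lowerChar (kl.getD (ki % kl.length) 'a')).toNat : Int) - 97
      Char.ofNat ((PySem.Int.mod ((c.toNat : Int) - base + k) 26 + base).toNat) :: vigLoop kl (ki + 1) rest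
    else c :: vigLoop kl ki rest

def vigenereEncrypt (pt : List Char) (key : List Char) : List Char :=
  let kl := key.filter PySem.Chars.isalpha
  if kl = [] then pt else vigLoop kl 0 pt

-- A's xor_encrypt_text: .encode('utf-8') is the list of code points, exact on the ASCII domain Dom_
def xorHex (s : List Char) (key : List Char) : List Char :=
  let ptbytes := s.map Char.toNat
  let keybytes := if key = [] then [0] else key.map Char.toNat
  ((List.range ptbytes.length).map
      (fun i => (ptbytes.getD i 0) ^^^ (keybytes.getD (i % keybytes.length) 0))).flatMap
    (fun b => [hexDigit (b / 16), hexDigit (b % 16)])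

def super_encrypt_text (plaintext : String) (key : String) : String :=
  let pt := plaintext.toList
  let k := key.toList
  let p := parseSuperKey k
  let vig := p.1
  let caesar := p.2.1
  let xr := p.2.2
  let stage1 := if vig ≠ [] then vigenereEncrypt pt vig else vigenereEncrypt pt k
  let shift : Int :=
    match caesar with
    | some c => PySem.Int.mod c 26
    | none =>
      let bfs := if vig ≠ [] then vig else k
      if bfs ≠ [] then (((bfs.map Char.toNat).sum % 26 : Nat) : Int) else 0
  let stage2 := caesarLoop shift stage1
  let xk := if xr ≠ [] then xr else k
  String.ofList (xorHex stage2 xk)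

-- ===== PORT B =====
-- B's last_field: backward scan of the parts for the last part naming one of the tags
def lastField (tags : List (List Char)) (parts : List (List Char)) : Option (List Char) :=
  parts.reverse.findSome? (fun p =>
    match nameval? p with
    | some (name, val) =>
      if PySem.Chars.lower (PySem.Chars.strip name) ∈ tags then some (PySem.Chars.strip val)
      else none
    | none => none)

-- B's single fused loop: Vigenere + Caesar + XOR + hex, two output chars per input char;
-- ki advances only on alphabetic chars, i indexes the XOR key bytes
def superLoop (kl : List Char) (shift : Int) (xkb : List Nat) (ki i : Nat) : List Char → List Char
  | [] => []
  | c :: rest =>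
    if PySem.Chars.isalpha c then
      let base : Int := if PySem.Chars.isupper c then 65 else 97
      let v : Int := if kl = [] then 0 else ((kl.getD (ki % kl.length) 'a').toNat : Int) - 97
      let b : Nat := (PySem.Int.mod ((c.toNat : Int) - base + v + shift) 26 + base).toNat
      let x : Nat := b ^^^ xkb.getD (i % xkb.length) 0
      hexDigit (x / 16) :: hexDigit (x % 16) :: superLoop kl shift xkb (ki + 1) (i + 1) rest
    else
      let x : Nat := c.toNat ^^^ xkb.getD (i % xkb.length) 0
      hexDigit (x / 16) :: hexDigit (x % 16) :: superLoop kl shift xkb ki (i + 1) rest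

def super_encrypt_text_alt (plaintext : String) (key : String) : String :=
  let pt := plaintext.toList
  let k := key.toList
  let parts := if k = [] then []
    else ((PySem.Chars.splitOn k [';']).filter (fun p => p.contains '=')).map PySem.Chars.strip
  let vcx : List Char × Option Int × List Char :=
    if k = [] then ([], none, [])
    else if parts = [] then (k, none, k)
    else ((lastField TVIG parts).getD [],        -- 'last_field(…) or ""' = getD "" (None → "", "" → "")
          (match lastField TCAE parts with
           | some cv => PySem.Int.ofChars? cv    -- int(cv); except → None
           | none => none),
          (lastField TXOR parts).getD [])
  let vig := vcx.1
  let caesar := vcx.2.1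
  let xr := vcx.2.2
  let vk := if vig = [] then k else vig
  let shift : Int :=
    match caesar with
    | some c => PySem.Int.mod c 26
    | none => if vk = [] then 0 else (((vk.map Char.toNat).sum % 26 : Nat) : Int)
  let kl := (vk.filter PySem.Chars.isalpha).map PySem.Chars.lowerChar
  let xk0 := if xr = [] then k else xr
  let xkb := if xk0 = [] then [0] else xk0.map Char.toNat
  String.ofList (superLoop kl shift xkb 0 0 pt)

-- ===== PRECONDITION & SPEC =====
def Spec_super_encrypt_text (plaintext : String) (key : String) (out : String) : Prop := out = super_encrypt_text_alt plaintext key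
instance (plaintext : String) (key : String) (out : String) : Decidable (Spec_super_encrypt_text plaintext key out) := by unfold Spec_super_encrypt_text; infer_instance

-- ===== CLAIM (what is proved, stated in full; the proofs are below) =====
def Claim_equal_super_encrypt_text : Prop := ∀ (plaintext : String) (key : String), Dom_super_encrypt_text plaintext key → Spec_super_encrypt_text plaintext key (super_encrypt_text plaintext key)

-- ===== LEMMAS AND PROOFS =====

-- the per-part field extractor used by B's lastField
def fieldVal (tags : List (List Char)) (p : List Char) : Option (List Char) :=
  match nameval? p with
  | some (name, val) =>
    if PySem.Chars.lower (PySem.Chars.strip name) ∈ tags then some (PySem.Chars.strip val) else none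
  | none => none

lemma lastField_eq (tags : List (List Char)) (parts : List (List Char)) :
    lastField tags parts = parts.reverse.findSome? (fieldVal tags) := rfl

lemma lastField_cons (tags : List (List Char)) (p : List Char) (parts : List (List Char)) :
    lastField tags (p :: parts) = (lastField tags parts).or (fieldVal tags p) := by
  simp [lastField_eq, List.findSome?_append]

-- what one step of A's fold does to each component, in terms of B's field extractor
lemma stepFn_fst (st : List Char × Option Int × List Char) (p : List Char) :
    (stepFn st p).1 = (fieldVal TVIG p).getD st.1 := by
  unfold stepFn fieldVal
  cases h : nameval? p with
  | none => rfl
  | some nv =>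
    obtain ⟨name0, val0⟩ := nv
    simp only []
    by_cases h1 : PySem.Chars.lower (PySem.Chars.strip name0) ∈ TVIG
    · simp [h1]
    · by_cases h2 : PySem.Chars.lower (PySem.Chars.strip name0) ∈ TCAE
      · simp [h1, h2]
      · by_cases h3 : PySem.Chars.lower (PySem.Chars.strip name0) ∈ TXOR <;> simp [h1, h2, h3]

lemma mem_TVIG_not_TCAE {n : List Char} (h : n ∈ TVIG) : n ∉ TCAE := by
  intro hc
  simp only [TVIG, TCAE, List.mem_cons, List.not_mem_nil, or_false] at h hc
  rcases h with rfl | rfl <;> exact absurd hc (by decide)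

lemma mem_TVIG_not_TXOR {n : List Char} (h : n ∈ TVIG) : n ∉ TXOR := by
  intro hc
  simp only [TVIG, TXOR, List.mem_cons, List.not_mem_nil, or_false] at h hc
  rcases h with rfl | rfl <;> exact absurd hc (by decide)

lemma mem_TCAE_not_TXOR {n : List Char} (h : n ∈ TCAE) : n ∉ TXOR := by
  intro hc
  simp only [TCAE, TXOR, List.mem_cons, List.not_mem_nil, or_false] at h hc
  subst h
  exact absurd hc (by decide)

lemma stepFn_cae (st : List Char × Option Int × List Char) (p : List Char) :
    (stepFn st p).2.1 =
      (match fieldVal TCAE p with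
       | some v => PySem.Int.ofChars? v
       | none => st.2.1) := by
  unfold stepFn fieldVal
  cases h : nameval? p with
  | none => rfl
  | some nv =>
    obtain ⟨name0, val0⟩ := nv
    simp only []
    by_cases h1 : PySem.Chars.lower (PySem.Chars.strip name0) ∈ TVIG
    · simp [h1, mem_TVIG_not_TCAE h1]
    · by_cases h2 : PySem.Chars.lower (PySem.Chars.strip name0) ∈ TCAE
      · simp [h1, h2]
      · by_cases h3 : PySem.Chars.lower (PySem.Chars.strip name0) ∈ TXOR <;> simp [h1, h2, h3]

lemma stepFn_xor (st : List Char × Option Int × List Char) (p : List Char) :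
    (stepFn st p).2.2 = (fieldVal TXOR p).getD st.2.2 := by
  unfold stepFn fieldVal
  cases h : nameval? p with
  | none => rfl
  | some nv =>
    obtain ⟨name0, val0⟩ := nv
    simp only []
    by_cases h1 : PySem.Chars.lower (PySem.Chars.strip name0) ∈ TVIG
    · simp [h1, mem_TVIG_not_TXOR h1]
    · by_cases h2 : PySem.Chars.lower (PySem.Chars.strip name0) ∈ TCAE
      · simp [h1, h2, mem_TCAE_not_TXOR h2]
      · by_cases h3 : PySem.Chars.lower (PySem.Chars.strip name0) ∈ TXOR <;> simp [h1, h2, h3]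

-- A's fold over the parts equals B's three backward scans
lemma foldl_fst (parts : List (List Char)) :
    ∀ st, (parts.foldl stepFn st).1 = (lastField TVIG parts).getD st.1 := by
  induction parts with
  | nil => intro st; simp [lastField]
  | cons p parts ih =>
    intro st
    rw [List.foldl_cons, ih, lastField_cons, stepFn_fst]
    cases lastField TVIG parts <;> cases fieldVal TVIG p <;> simp [Option.or]

lemma foldl_cae (parts : List (List Char)) :
    ∀ st, (parts.foldl stepFn st).2.1 =
      (match lastField TCAE parts with
       | some v => PySem.Int.ofChars? v
       | none => st.2.1) := by
  induction parts with
  | nil => intro st; simp [lastField]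
  | cons p parts ih =>
    intro st
    rw [List.foldl_cons, ih, lastField_cons]
    cases lastField TCAE parts <;> cases h : fieldVal TCAE p <;>
      simp [Option.or, stepFn_cae, h]

lemma foldl_xor (parts : List (List Char)) :
    ∀ st, (parts.foldl stepFn st).2.2 = (lastField TXOR parts).getD st.2.2 := by
  induction parts with
  | nil => intro st; simp [lastField]
  | cons p parts ih =>
    intro st
    rw [List.foldl_cons, ih, lastField_cons, stepFn_xor]
    cases lastField TXOR parts <;> cases fieldVal TXOR p <;> simp [Option.or]

-- the two key parsers agree
lemma parse_eq (k : List Char) :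
    parseSuperKey k =
      (let parts := if k = [] then []
         else ((PySem.Chars.splitOn k [';']).filter (fun p => p.contains '=')).map PySem.Chars.strip
       if k = [] then ([], none, [])
       else if parts = [] then (k, none, k)
       else ((lastField TVIG parts).getD [],
             (match lastField TCAE parts with
              | some cv => PySem.Int.ofChars? cv
              | none => none),
             (lastField TXOR parts).getD [])) := by
  unfold parseSuperKey
  by_cases hk : k = []
  · simp [hk]
  · simp only [hk, if_false]
    set parts := ((PySem.Chars.splitOn k [';']).filter (fun p => p.contains '=')).map PySem.Chars.strip with hp
    by_cases hparts : parts = []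
    · simp [hparts]
    · simp only [if_neg hparts]
      refine Prod.ext (foldl_fst parts _) (Prod.ext (foldl_cae parts _) (foldl_xor parts _))

-- proof-side model of the merged Vigenere+Caesar pass (A's two loops fused, no XOR yet)
def fusedLoop (kl : List Char) (shift : Int) (ki : Nat) : List Char → List Char
  | [] => []
  | c :: rest =>
    if PySem.Chars.isalpha c then
      let base : Int := if PySem.Chars.isupper c then 65 else 97
      let v : Int := if kl = [] then 0 else ((kl.getD (ki % kl.length) 'a').toNat : Int) - 97
      Char.ofNat ((PySem.Int.mod ((c.toNat : Int) - base + v + shift) 26 + base).toNat) :: fusedLoop kl shift (ki + 1) rest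
    else c :: fusedLoop kl shift ki rest

lemma toNat_ofNat_small (n : Nat) (h : n < 55296) : (Char.ofNat n).toNat = n := by
  rw [Char.toNat_ofNat]
  simp [Nat.isValidChar, h]

lemma isupper_iff (c : Char) : PySem.Chars.isupper c = true ↔ 65 ≤ c.toNat ∧ c.toNat ≤ 90 := by
  simp [PySem.Chars.isupper, Char.le_def, UInt32.le_iff_toNat_le, Char.toNat_val]

lemma mod_shift (a s : Int) : PySem.Int.mod (PySem.Int.mod a 26 + s) 26 = PySem.Int.mod (a + s) 26 := by
  rw [PySem.Int.mod_eq_emod_of_pos (by norm_num), PySem.Int.mod_eq_emod_of_pos (by norm_num),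
      PySem.Int.mod_eq_emod_of_pos (by norm_num)]
  omega

-- the key alphabetic-character fact: a Caesar shift applied after a Vigenere shift
-- is one shift by the sum, and the intermediate character keeps its case.
lemma step (c : Char) (k shift base : Int)
    (hb : base = if PySem.Chars.isupper c then 65 else 97)
    (c1 : Char) (hc1 : c1 = Char.ofNat ((PySem.Int.mod ((c.toNat : Int) - base + k) 26 + base).toNat)) :
    PySem.Chars.isalpha c1 = true ∧ PySem.Chars.isupper c1 = PySem.Chars.isupper c ∧
      Char.ofNat ((PySem.Int.mod ((c1.toNat : Int) - base + shift) 26 + base).toNat)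
        = Char.ofNat ((PySem.Int.mod ((c.toNat : Int) - base + k + shift) 26 + base).toNat) := by
  have hm0 : 0 ≤ PySem.Int.mod ((c.toNat : Int) - base + k) 26 := PySem.Int.mod_nonneg _ (by norm_num)
  have hmlt : PySem.Int.mod ((c.toNat : Int) - base + k) 26 < 26 := PySem.Int.mod_lt _ (by norm_num)
  have hbr : base = 65 ∨ base = 97 := by
    rw [hb]; by_cases h : PySem.Chars.isupper c <;> simp [h]
  have htn : (c1.toNat : Int) = PySem.Int.mod ((c.toNat : Int) - base + k) 26 + base := by
    rw [hc1, toNat_ofNat_small _ (by omega)]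
    omega
  have hup : PySem.Chars.isupper c1 = PySem.Chars.isupper c := by
    by_cases h : PySem.Chars.isupper c
    · have hb' : base = 65 := by rw [hb, if_pos h]
      rw [h, isupper_iff]
      omega
    · have hb' : base = 97 := by rw [hb, if_neg h]
      rw [Bool.not_eq_true] at h
      rw [h, Bool.eq_false_iff]
      intro hcon
      rw [isupper_iff] at hcon
      omega
  refine ⟨?_, hup, ?_⟩
  · have hlo : PySem.Chars.islower c1 = true ↔ 97 ≤ c1.toNat ∧ c1.toNat ≤ 122 := by
      simp [PySem.Chars.islower, Char.le_def, UInt32.le_iff_toNat_le, Char.toNat_val]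
    rcases hbr with h65 | h97
    · have hu1 : PySem.Chars.isupper c1 = true := by rw [isupper_iff]; omega
      simp [PySem.Chars.isalpha, hu1]
    · have hl1 : PySem.Chars.islower c1 = true := by rw [hlo]; omega
      simp [PySem.Chars.isalpha, hl1]
  · rw [htn]
    have : PySem.Int.mod ((c.toNat : Int) - base + k) 26 + base - base + shift
        = PySem.Int.mod ((c.toNat : Int) - base + k) 26 + shift := by ring
    rw [this, mod_shift]

lemma caesar_eq_fused_nil (shift : Int) (ki : Nat) (pt : List Char) :
    caesarLoop shift pt = fusedLoop [] shift ki pt := by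
  induction pt generalizing ki with
  | nil => rfl
  | cons c rest ih =>
    by_cases h : PySem.Chars.isalpha c
    · simp only [caesarLoop, fusedLoop, h, if_true, add_zero]
      exact congrArg _ (ih (ki + 1))
    · simp only [caesarLoop, fusedLoop, h, if_false, Bool.false_eq_true]
      exact congrArg _ (ih ki)

lemma caesar_vig_eq_fused (kl : List Char) (hne : kl ≠ []) (shift : Int) (ki : Nat) (pt : List Char) :
    caesarLoop shift (vigLoop kl ki pt) = fusedLoop (kl.map PySem.Chars.lowerChar) shift ki pt := by
  induction pt generalizing ki with
  | nil => rfl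
  | cons c rest ih =>
    by_cases h : PySem.Chars.isalpha c
    · simp only [vigLoop, h, if_true]
      obtain ⟨ha1, hup1, heq⟩ := step c
        (((PySem.Chars.lowerChar (kl.getD (ki % kl.length) 'a')).toNat : Int) - 97) shift
        (if PySem.Chars.isupper c then 65 else 97) rfl _ rfl
      simp only [caesarLoop, fusedLoop, h, ha1, if_true, hup1]
      congr 1
      · rw [heq]
        have hmapne : kl.map PySem.Chars.lowerChar ≠ [] := by simpa using hne
        have hv : (kl.map PySem.Chars.lowerChar).getD (ki % (kl.map PySem.Chars.lowerChar).length) 'a'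
            = PySem.Chars.lowerChar (kl.getD (ki % kl.length) 'a') := by
          have hlena : PySem.Chars.lowerChar 'a' = 'a' := by decide
          rw [List.length_map, ← hlena, List.getD_map, hlena]
        simp only [if_neg hmapne, hv]
      · exact ih (ki + 1)
    · simp only [vigLoop, h, if_false, Bool.false_eq_true, caesarLoop, fusedLoop]
      exact congrArg _ (ih ki)

lemma main_stage (pt vk : List Char) (shift : Int) :
    caesarLoop shift (vigenereEncrypt pt vk)
      = fusedLoop ((vk.filter PySem.Chars.isalpha).map PySem.Chars.lowerChar) shift 0 pt := by
  unfold vigenereEncrypt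
  by_cases hkl : vk.filter PySem.Chars.isalpha = []
  · simp only [hkl, List.map_nil]
    exact caesar_eq_fused_nil shift 0 pt
  · simp only [hkl]
    exact caesar_vig_eq_fused _ hkl shift 0 pt

-- recursive form of the XOR+hex pass starting at byte offset i
def hexRec (kb : List Nat) (i : Nat) : List Char → List Char
  | [] => []
  | c :: s =>
    hexDigit ((c.toNat ^^^ kb.getD (i % kb.length) 0) / 16) ::
    hexDigit ((c.toNat ^^^ kb.getD (i % kb.length) 0) % 16) :: hexRec kb (i + 1) s

lemma hexAux (kb : List Nat) (s : List Char) :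
    ∀ i, ((List.range s.length).map
        (fun j => ((s.map Char.toNat).getD j 0) ^^^ (kb.getD ((i + j) % kb.length) 0))).flatMap
      (fun b => [hexDigit (b / 16), hexDigit (b % 16)]) = hexRec kb i s := by
  induction s with
  | nil => intro i; rfl
  | cons c s ih =>
    intro i
    rw [List.length_cons, List.range_succ_eq_map, List.map_cons, List.map_map, List.flatMap_cons]
    have harg : ((List.range s.length).map
          ((fun j => (((c :: s).map Char.toNat).getD j 0) ^^^ (kb.getD ((i + j) % kb.length) 0)) ∘ Nat.succ))
        = (List.range s.length).map
          (fun j => ((s.map Char.toNat).getD j 0) ^^^ (kb.getD ((i + 1 + j) % kb.length) 0)) := by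
      apply List.map_congr_left
      intro j _
      have hij : i + (j + 1) = i + 1 + j := by omega
      simp only [Function.comp, List.map_cons, Nat.succ_eq_add_one, List.getD_cons_succ, hij]
    rw [harg, ih (i + 1)]
    simp [hexRec]

lemma xorHex_eq_hexRec (s : List Char) (key : List Char) :
    xorHex s key = hexRec (if key = [] then [0] else key.map Char.toNat) 0 s := by
  unfold xorHex
  rw [← hexAux (if key = [] then [0] else key.map Char.toNat) s 0]
  simp [List.length_map]

lemma mod_base_toNat_lt (a base : Int) (hb : base = 65 ∨ base = 97) :
    (PySem.Int.mod a 26 + base).toNat < 55296 := by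
  have h1 := PySem.Int.mod_nonneg a (by norm_num : (0:Int) < 26)
  have h2 := PySem.Int.mod_lt a (by norm_num : (0:Int) < 26)
  rcases hb with rfl | rfl <;> omega

-- B's single loop is the merged alphabetic pass followed by the XOR+hex pass
lemma superLoop_eq (kl : List Char) (shift : Int) (xkb : List Nat) (pt : List Char) :
    ∀ ki i, superLoop kl shift xkb ki i pt = hexRec xkb i (fusedLoop kl shift ki pt) := by
  induction pt with
  | nil => intro ki i; rfl
  | cons c rest ih =>
    intro ki i
    by_cases h : PySem.Chars.isalpha c
    · have hb :=
        toNat_ofNat_small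
          ((PySem.Int.mod ((c.toNat : Int) - (if PySem.Chars.isupper c then 65 else 97)
            + (if kl = [] then 0 else ((kl.getD (ki % kl.length) 'a').toNat : Int) - 97) + shift) 26
            + (if PySem.Chars.isupper c then 65 else 97)).toNat)
          (mod_base_toNat_lt _ _ (by by_cases hu : PySem.Chars.isupper c <;> simp [hu]))
      simp only [superLoop, fusedLoop, h, if_true, hexRec, hb]
      exact congrArg _ (congrArg _ (ih (ki + 1) (i + 1)))
    · simp only [superLoop, fusedLoop, h, if_false, Bool.false_eq_true, hexRec]
      exact congrArg _ (congrArg _ (ih ki (i + 1)))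

-- ===== VERDICT (by name: the statement is the Claim_ definition above) =====
theorem super_encrypt_text_spec : Claim_equal_super_encrypt_text := by
  intro plaintext key _
  unfold Spec_super_encrypt_text super_encrypt_text super_encrypt_text_alt
  dsimp only
  rw [parse_eq]
  dsimp only
  generalize plaintext.toList = pt
  generalize hkdef : key.toList = k
  generalize hvcx : (if k = [] then (([] : List Char), (none : Option Int), ([] : List Char))
      else if (if k = [] then ([] : List (List Char)) else ((PySem.Chars.splitOn k [';']).filter (fun p => p.contains '=')).map PySem.Chars.strip) = []
      then (k, none, k)
      else ((lastField TVIG (if k = [] then ([] : List (List Char)) else ((PySem.Chars.splitOn k [';']).filter (fun p => p.contains '=')).map PySem.Chars.strip)).getD [],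
            (match lastField TCAE (if k = [] then ([] : List (List Char)) else ((PySem.Chars.splitOn k [';']).filter (fun p => p.contains '=')).map PySem.Chars.strip) with
             | some cv => PySem.Int.ofChars? cv
             | none => none),
            (lastField TXOR (if k = [] then ([] : List (List Char)) else ((PySem.Chars.splitOn k [';']).filter (fun p => p.contains '=')).map PySem.Chars.strip)).getD [])) = vcx
  obtain ⟨vig, caesar, xr⟩ := vcx
  clear hvcx
  dsimp only
  have hstage : (if vig ≠ [] then vigenereEncrypt pt vig else vigenereEncrypt pt k)
      = vigenereEncrypt pt (if vig = [] then k else vig) := by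
    by_cases h : vig = [] <;> simp [h]
  have hvk : (if vig ≠ [] then vig else k) = (if vig = [] then k else vig) := by
    by_cases h : vig = [] <;> simp [h]
  have hshift : (match caesar with
      | some c => PySem.Int.mod c 26
      | none =>
        if (if vig ≠ [] then vig else k) ≠ []
        then ((((if vig ≠ [] then vig else k).map Char.toNat).sum % 26 : Nat) : Int) else 0)
    = (match caesar with
      | some c => PySem.Int.mod c 26
      | none =>
        if (if vig = [] then k else vig) = [] then 0
        else ((((if vig = [] then k else vig).map Char.toNat).sum % 26 : Nat) : Int)) := by
    cases caesar with
    | some c => rfl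
    | none =>
      rw [hvk]
      by_cases h : (if vig = [] then k else vig) = [] <;> simp [h]
  have hxk : (if xr ≠ [] then xr else k) = (if xr = [] then k else xr) := by
    by_cases h : xr = [] <;> simp [h]
  rw [hstage, hshift, hxk]
  apply congrArg String.ofList
  rw [xorHex_eq_hexRec, main_stage, superLoop_eq]
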